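-- pv_equiv track=rewrite | github.com/simirajpal/CS-CM124 | phasing.py | lst_haplotypes
-- ===== SOURCE A (Python) =====
-- def convert_to_genotypes(snps):
-- 	 return [[snps[i][j] for i in range(len(snps))] for j in range(len(snps[0]))]
--
-- def lst_haplotypes(data):
-- 	genotypes = convert_to_genotypes(data)
-- 	unknown_haplotypes = []
-- 	for genotype in genotypes:
-- 		lst = []
-- 		for snp in genotype:
-- 			if snp == 2:
-- 				# two haplotypes both have alleles 1
-- 				lst.append('1')
-- 			if snp == 1:
-- 				# haplotype 1 can have 1 and haplotype 2 will have 0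
-- 				# haplotype 1 can have 0 and haplotype 2 will have 1
-- 				lst.append('heterozygous')
-- 			if snp == 0:
-- 				# two haplotypes both have alleles 0
-- 				lst.append('0')
-- 		unknown_haplotypes.append(lst)
-- 	haplotypes = [possible_haplotypes(haplotype) for haplotype in unknown_haplotypes]
-- 	haplotypes = haplotype_pairs(unknown_haplotypes, haplotypes)
-- 	return haplotypes
--
-- def possible_haplotypes(haplotype):
-- 	final_haplotype = [[]]
-- 	for snp in haplotype:
-- 		if snp == '0' or snp == '1':
-- 			for pos in final_haplotype:
-- 				pos.append(snp)
-- 		elif snp == 'heterozygous':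
-- 			final_haplotype2 = [[] for each in range(len(final_haplotype))]
-- 			for i in range(len(final_haplotype)):
-- 				for j in range(len(final_haplotype[i])):
-- 					final_haplotype2[i].append(final_haplotype[i][j])
-- 			for k in range(len(final_haplotype)):
-- 				final_haplotype[k].append('0')
-- 				final_haplotype2[k].append('1')
-- 			final_haplotype = list(final_haplotype + final_haplotype2)
-- 	return final_haplotype
--
-- def haplotype_pairs(unknown_haplotypes, lst_haplotypes):
-- 	haplotype_pairs = []
-- 	for i in range(len(lst_haplotypes)):
-- 		indiv_hap_pairs = []
-- 		for j in range(len(lst_haplotypes[i])):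
-- 			haplotype = []
-- 			for k in range(len(lst_haplotypes[i][j])):
-- 				if unknown_haplotypes[i][k] == lst_haplotypes[i][j][k]:
-- 					if lst_haplotypes[i][j][k] == '1':
-- 						haplotype.append('1')
-- 					else:
-- 						haplotype.append('0')
-- 				else:
-- 					if lst_haplotypes[i][j][k] == '1':
-- 						haplotype.append('0')
-- 					else:
-- 						haplotype.append('1')
-- 			pair = [lst_haplotypes[i][j], haplotype]
-- 			rev_pair = [haplotype, lst_haplotypes[i][j]]
-- 			if pair not in indiv_hap_pairs and rev_pair not in indiv_hap_pairs:
-- 				indiv_hap_pairs.append(pair)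
-- 		haplotype_pairs.append(indiv_hap_pairs)
-- 	return haplotype_pairs
-- ===== SOURCE B (Python) =====
-- def lst_haplotypes(data):
--     # Direct per-column enumeration of kept haplotype pairs: for h heterozygous
--     # sites only the first 2**(h-1) bit patterns survive A's dedup (each later
--     # one is the complement of an earlier one), so generate exactly those and
--     # emit each haplotype together with its complement in one pass.
--     out = []
--     for j in range(len(data[0])):
--         col = [data[i][j] for i in range(len(data))]
--         h = sum(1 for s in col if s == 1)
--         n = (1 << (h - 1)) if h > 0 else 1
--         pairs = []
--         for i in range(n):
--             hap, comp = [], []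
--             b = 0
--             for s in col:
--                 if s == 0:
--                     hap.append('0'); comp.append('0')
--                 elif s == 2:
--                     hap.append('1'); comp.append('1')
--                 elif s == 1:
--                     bit = (i >> b) & 1
--                     hap.append(str(bit)); comp.append(str(1 - bit))
--                     b += 1
--             pairs.append([hap, comp])
--         out.append(pairs)
--     return out
-- ===== Notes on version B (the rewrite author's own statement) =====
-- stated objective: alternative
-- what changed: Instead of enumerating all 2^h haplotypes per genotype, complementing each with an inner index loop and deduplicating pairs with membership scans, B directly generates the max(1, 2^(h-1)) surviving pairs, building each haplotype and its bit-flipped complement in a single pass over the column.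
import Mathlib
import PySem

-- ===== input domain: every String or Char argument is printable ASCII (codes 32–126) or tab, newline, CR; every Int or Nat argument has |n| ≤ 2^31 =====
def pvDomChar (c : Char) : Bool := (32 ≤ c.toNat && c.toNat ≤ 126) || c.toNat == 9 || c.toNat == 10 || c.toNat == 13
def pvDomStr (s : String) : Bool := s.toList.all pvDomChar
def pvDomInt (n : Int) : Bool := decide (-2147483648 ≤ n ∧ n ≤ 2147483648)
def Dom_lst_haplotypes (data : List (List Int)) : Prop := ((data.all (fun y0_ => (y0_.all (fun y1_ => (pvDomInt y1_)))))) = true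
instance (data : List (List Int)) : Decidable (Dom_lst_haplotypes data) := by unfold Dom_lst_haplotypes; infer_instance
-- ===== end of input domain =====

-- B replaces A's full per-genotype 2^h haplotype enumeration, per-haplotype complement loop
-- and pair-dedup membership scans by directly generating the max(1, 2^(h-1)) surviving pairs,
-- building each haplotype and its bit-flipped complement in one pass over the column
-- (objective: alternative algorithm, same value).

-- ===== PORT A =====
def pvConvert (snps : List (List Int)) : List (List Int) :=
  (PySem.List.pyRange 0 ((snps.headD []).length : Int) 1).map (fun j =>
    (PySem.List.pyRange 0 (snps.length : Int) 1).map (fun i =>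
      PySem.List.pyGetD (PySem.List.pyGetD snps i []) j 0))

def pvTok (genotype : List Int) : List String :=
  genotype.foldl (fun lst snp =>
    let lst := if snp = 2 then lst ++ ["1"] else lst
    let lst := if snp = 1 then lst ++ ["heterozygous"] else lst
    if snp = 0 then lst ++ ["0"] else lst) []

def pvPossible (haplotype : List String) : List (List String) :=
  haplotype.foldl (fun fh snp =>
    if snp = "0" ∨ snp = "1" then fh.map (fun pos => pos ++ [snp])
    else if snp = "heterozygous" then fh.map (fun p => p ++ ["0"]) ++ fh.map (fun p => p ++ ["1"])
    else fh) [[]]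

def pvPairs (unknown : List (List String)) (lh : List (List (List String))) :
    List (List (List (List String))) :=
  (PySem.List.pyRange 0 (lh.length : Int) 1).foldl (fun hp i =>
    let indiv := (PySem.List.pyRange 0 ((PySem.List.pyGetD lh i []).length : Int) 1).foldl
      (fun indiv j =>
        let hapj := PySem.List.pyGetD (PySem.List.pyGetD lh i []) j []
        let haplotype := (PySem.List.pyRange 0 (hapj.length : Int) 1).foldl (fun hap k =>
          if PySem.List.pyGetD (PySem.List.pyGetD unknown i []) k "" = PySem.List.pyGetD hapj k "" then
            (if PySem.List.pyGetD hapj k "" = "1" then hap ++ ["1"] else hap ++ ["0"])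
          else
            (if PySem.List.pyGetD hapj k "" = "1" then hap ++ ["0"] else hap ++ ["1"])) []
        let pair := [hapj, haplotype]
        let rev_pair := [haplotype, hapj]
        if pair ∉ indiv ∧ rev_pair ∉ indiv then indiv ++ [pair] else indiv) []
    hp ++ [indiv]) []

def lst_haplotypes (data : List (List Int)) : List (List (List (List String))) :=
  let genotypes := pvConvert data
  let unknown := genotypes.foldl (fun u g => u ++ [pvTok g]) []
  let haplotypes := unknown.map pvPossible
  pvPairs unknown haplotypes

-- ===== PORT B =====
def pvBuildPair (col : List Int) (i : Int) : List String × List String :=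
  let t := col.foldl (fun (st : List String × List String × Nat) s =>
    if s = 0 then (st.1 ++ ["0"], st.2.1 ++ ["0"], st.2.2)
    else if s = 2 then (st.1 ++ ["1"], st.2.1 ++ ["1"], st.2.2)
    else if s = 1 then
      let bit := PySem.Int.band (i >>> st.2.2) 1
      (st.1 ++ [PySem.Int.toStr bit], st.2.1 ++ [PySem.Int.toStr (1 - bit)], st.2.2 + 1)
    else st) ([], [], 0)
  (t.1, t.2.1)

def lst_haplotypes_alt (data : List (List Int)) : List (List (List (List String))) :=
  (PySem.List.pyRange 0 ((data.headD []).length : Int) 1).map (fun j =>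
    let col := (PySem.List.pyRange 0 (data.length : Int) 1).map (fun i =>
      PySem.List.pyGetD (PySem.List.pyGetD data i []) j 0)
    let h := col.countP (fun s => s = 1)
    let n : Nat := if h > 0 then 1 <<< (h - 1) else 1
    (PySem.List.pyRange 0 (n : Int) 1).map (fun i =>
      let p := pvBuildPair col i
      [p.1, p.2]))

-- ===== PRECONDITION & SPEC =====
-- Pre_ excludes exactly the inputs on which the Python A raises IndexError:
-- empty data (data[0]) and rows shorter than the first row (data[i][j]).
def Pre_lst_haplotypes (data : List (List Int)) : Prop :=
  data ≠ [] ∧ ∀ row ∈ data, (data.headD []).length ≤ row.length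
instance (data : List (List Int)) : Decidable (Pre_lst_haplotypes data) := by
  unfold Pre_lst_haplotypes; infer_instance

def pvWitness_lst_haplotypes : List (List Int) := [[1, 0], [2, 1]]

def Spec_lst_haplotypes (data : List (List Int)) (out : List (List (List (List String)))) : Prop :=
  out = lst_haplotypes_alt data
instance (data : List (List Int)) (out : List (List (List (List String)))) :
    Decidable (Spec_lst_haplotypes data out) := by unfold Spec_lst_haplotypes; infer_instance

-- ===== CLAIM (what is proved, stated in full; the proofs are below) =====
def Claim_equal_lst_haplotypes : Prop := ∀ (data : List (List Int)), Dom_lst_haplotypes data →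
  Pre_lst_haplotypes data → Spec_lst_haplotypes data (lst_haplotypes data)

-- ===== LEMMAS AND PROOFS =====

def pvTokL : List Int → List String
  | [] => []
  | s :: r =>
    if s = 2 then "1" :: pvTokL r
    else if s = 1 then "heterozygous" :: pvTokL r
    else if s = 0 then "0" :: pvTokL r
    else pvTokL r

def pvHets (ts : List String) : Nat := ts.countP (fun t => t = "heterozygous")
def pvTokP (ts : List String) : Prop := ∀ t ∈ ts, t = "0" ∨ t = "1" ∨ t = "heterozygous"

lemma pvTok_aux (col : List Int) (acc : List String) :
    col.foldl (fun lst snp =>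
      let lst := if snp = 2 then lst ++ ["1"] else lst
      let lst := if snp = 1 then lst ++ ["heterozygous"] else lst
      if snp = 0 then lst ++ ["0"] else lst) acc = acc ++ pvTokL col := by
  induction col generalizing acc with
  | nil => simp [pvTokL]
  | cons s r ih =>
    simp only [List.foldl_cons, pvTokL]
    rcases eq_or_ne s 2 with h2 | h2
    · subst h2; simp [ih]
    · rcases eq_or_ne s 1 with h1 | h1
      · subst h1; simp [ih]
      · rcases eq_or_ne s 0 with h0 | h0
        · subst h0; simp [ih]
        · simp [h2, h1, h0, ih]

lemma pvTok_eq (col : List Int) : pvTok col = pvTokL col := by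
  simpa using pvTok_aux col []

lemma pvTokP_tokL (col : List Int) : pvTokP (pvTokL col) := by
  induction col with
  | nil => intro t ht; simp [pvTokL] at ht
  | cons s r ih =>
    intro t ht
    simp only [pvTokL] at ht
    split_ifs at ht with h2 h1 h0
    · rcases List.mem_cons.mp ht with h | h
      · simp [h]
      · exact ih t h
    · rcases List.mem_cons.mp ht with h | h
      · simp [h]
      · exact ih t h
    · rcases List.mem_cons.mp ht with h | h
      · simp [h]
      · exact ih t h
    · exact ih t ht

lemma pvHets_tokL (col : List Int) : pvHets (pvTokL col) = col.countP (fun s => s = 1) := by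
  induction col with
  | nil => simp [pvTokL, pvHets]
  | cons s r ih =>
    simp only [pvTokL]
    split_ifs with h2 h1 h0 <;> simp_all [pvHets]
def pvCH : List String → Nat → List String
  | [], _ => []
  | t :: ts, i =>
    if t = "heterozygous" then (if i % 2 = 1 then "1" else "0") :: pvCH ts (i / 2)
    else t :: pvCH ts i

lemma pvCH_length (ts : List String) (i : Nat) : (pvCH ts i).length = ts.length := by
  induction ts generalizing i with
  | nil => simp [pvCH]
  | cons t ts ih => simp only [pvCH]; split_ifs <;> simp [ih]

lemma pvHets_cons_het (ts : List String) : pvHets ("heterozygous" :: ts) = pvHets ts + 1 := by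
  simp [pvHets]
lemma pvHets_cons_ne (t : String) (ts : List String) (h : t ≠ "heterozygous") :
    pvHets (t :: ts) = pvHets ts := by
  simp [pvHets, h]

lemma pvCH_mod (ts : List String) (i : Nat) : pvCH ts (i % 2 ^ pvHets ts) = pvCH ts i := by
  induction ts generalizing i with
  | nil => simp [pvCH]
  | cons t ts ih =>
    by_cases h : t = "heterozygous"
    · subst h
      simp only [pvCH, pvHets_cons_het, reduceIte]
      congr 1
      · rw [Nat.mod_mod_of_dvd i (dvd_pow_self 2 (Nat.succ_ne_zero _))]
      · rw [pow_succ', Nat.mod_mul_right_div_self, ih]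
    · simp only [pvCH, if_neg h, pvHets_cons_ne t ts h, ih]

lemma pvCH_append (ts us : List String) (i : Nat) :
    pvCH (ts ++ us) i = pvCH ts i ++ pvCH us (i / 2 ^ pvHets ts) := by
  induction ts generalizing i with
  | nil => simp [pvCH, pvHets]
  | cons t ts ih =>
    by_cases h : t = "heterozygous"
    · subst h
      simp only [List.cons_append, pvCH, pvHets_cons_het, reduceIte, ih]
      rw [pow_succ', ← Nat.div_div_eq_div_mul]
    · simp only [List.cons_append, pvCH, if_neg h, pvHets_cons_ne t ts h, ih, List.cons_append]

lemma pvCH_inj (ts : List String) (i j : Nat) (hi : i < 2 ^ pvHets ts) (hj : j < 2 ^ pvHets ts)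
    (h : pvCH ts i = pvCH ts j) : i = j := by
  induction ts generalizing i j with
  | nil => simp [pvHets] at hi hj; omega
  | cons t ts ih =>
    by_cases ht : t = "heterozygous"
    · subst ht
      rw [pvHets_cons_het, pow_succ'] at hi hj
      simp only [pvCH, reduceIte, List.cons.injEq] at h
      have hb : i % 2 = j % 2 := by
        rcases Nat.mod_two_eq_zero_or_one i with h1 | h1 <;>
          rcases Nat.mod_two_eq_zero_or_one j with h2 | h2 <;>
            simp [h1, h2] at h ⊢
      have ht : i / 2 = j / 2 := ih (i / 2) (j / 2) (by omega) (by omega) h.2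
      omega
    · rw [pvHets_cons_ne t ts ht] at hi hj
      simp only [pvCH, if_neg ht, List.cons.injEq] at h
      exact ih i j hi hj h.2


lemma pvHets_append_single (ts : List String) (t : String) (h : t ≠ "heterozygous") :
    pvHets (ts ++ [t]) = pvHets ts := by
  simp [pvHets, List.countP_append, h]

lemma pvHets_append_het (ts : List String) :
    pvHets (ts ++ ["heterozygous"]) = pvHets ts + 1 := by
  simp [pvHets, List.countP_append]

lemma pvPossible_eq (ts : List String) (h : pvTokP ts) :
    pvPossible ts = (List.range (2 ^ pvHets ts)).map (pvCH ts) := by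
  induction ts using List.reverseRecOn with
  | nil => simp [pvPossible, pvHets, pvCH]
  | append_singleton ts t ih =>
    have hts : pvTokP ts := fun x hx => h x (List.mem_append_left _ hx)
    have ht : t = "0" ∨ t = "1" ∨ t = "heterozygous" := h t (by simp)
    unfold pvPossible at ih ⊢
    rw [List.foldl_append, List.foldl_cons, List.foldl_nil, ih hts]
    rcases ht with ht | ht | ht
    · subst ht
      rw [if_pos (Or.inl rfl), pvHets_append_single ts "0" (by decide), List.map_map]
      refine List.map_congr_left (fun i hi => ?_)
      simp [Function.comp_apply, pvCH_append, pvCH]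
    · subst ht
      rw [if_pos (Or.inr rfl), pvHets_append_single ts "1" (by decide), List.map_map]
      refine List.map_congr_left (fun i hi => ?_)
      simp [Function.comp_apply, pvCH_append, pvCH]
    · subst ht
      rw [if_neg (by decide), if_pos rfl, pvHets_append_het, pow_succ]
      rw [mul_two (2 ^ pvHets ts), List.range_add, List.map_append, List.map_map, List.map_map]
      congr 1
      · refine List.map_congr_left (fun i hi => ?_)
        simp only [Function.comp_apply, pvCH_append, pvCH, reduceIte]
        rw [Nat.div_eq_of_lt (List.mem_range.mp hi)]
        simp
      · rw [List.map_map]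
        refine List.map_congr_left (fun i hi => ?_)
        have hi' := List.mem_range.mp hi
        simp only [Function.comp_apply, pvCH_append, pvCH]
        have h1 : (2 ^ pvHets ts + i) / 2 ^ pvHets ts = 1 := by
          rw [Nat.add_comm, Nat.add_div_right i (by positivity),
            Nat.div_eq_of_lt hi']
        have h2 : pvCH ts (2 ^ pvHets ts + i) = pvCH ts i := by
          conv_lhs => rw [← pvCH_mod]
          rw [Nat.add_mod_left, Nat.mod_eq_of_lt hi']
        simp only [h1, h2, reduceIte]

def pvComp (u c : String) : String :=
  if u = c then (if c = "1" then "1" else "0") else (if c = "1" then "0" else "1")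

lemma pvComp_eq (ts : List String) (i : Nat) (ht : pvTokP ts) (hi : i < 2 ^ pvHets ts) :
    (ts.zip (pvCH ts i)).map (fun p => pvComp p.1 p.2) = pvCH ts (2 ^ pvHets ts - 1 - i) := by
  induction ts generalizing i with
  | nil => simp [pvCH]
  | cons t ts ih =>
    have hts : pvTokP ts := fun x hx => ht x (List.mem_cons_of_mem _ hx)
    have hP : 0 < 2 ^ pvHets ts := by positivity
    rcases ht t (List.mem_cons_self) with h0 | h0 | h0
    · subst h0
      rw [pvHets_cons_ne _ ts (by decide)] at hi ⊢
      simp only [pvCH, String.reduceEq, reduceIte, List.zip_cons_cons, List.map_cons, ih i hts hi]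
      congr 1
    · subst h0
      rw [pvHets_cons_ne _ ts (by decide)] at hi ⊢
      simp only [pvCH, String.reduceEq, reduceIte, List.zip_cons_cons, List.map_cons, ih i hts hi]
      congr 1
    · subst h0
      rw [pvHets_cons_het, pow_succ'] at hi ⊢
      simp only [pvCH, List.zip_cons_cons, List.map_cons, reduceIte]
      have htl := ih (i / 2) hts (by omega)
      have harg : (2 * 2 ^ pvHets ts - 1 - i) / 2 = 2 ^ pvHets ts - 1 - i / 2 := by omega
      have hpar : (2 * 2 ^ pvHets ts - 1 - i) % 2 = 1 - i % 2 := by omega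
      rw [harg, hpar, htl]
      rcases Nat.mod_two_eq_zero_or_one i with h1 | h1 <;> simp [h1, pvComp]

lemma pvFoldl_range_zip {α β γ : Type} (d1 : α) (d2 : β) (g : γ → α → β → γ) :
    ∀ (hs : List β) (ts : List α) (init : γ), ts.length = hs.length →
    (List.range hs.length).foldl (fun acc k => g acc (ts.getD k d1) (hs.getD k d2)) init
    = (ts.zip hs).foldl (fun acc p => g acc p.1 p.2) init := by
  intro hs
  induction hs with
  | nil => intro ts init hlen; rw [List.length_eq_zero_iff.mp hlen]; simp
  | cons b hs ih =>
    intro ts init hlen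
    rcases ts with _ | ⟨a, ts⟩
    · simp at hlen
    · simp only [List.length_cons, List.range_succ_eq_map, List.foldl_cons, List.foldl_map,
        List.getD_cons_zero, List.getD_cons_succ, List.zip_cons_cons]
      exact ih ts (g init a b) (by simpa using hlen)

lemma pvFoldl_pyRange_zip {α β γ : Type} (ts : List α) (hs : List β) (d1 : α) (d2 : β)
    (g : γ → α → β → γ) (init : γ) (hlen : ts.length = hs.length) :
    (PySem.List.pyRange 0 (hs.length : Int) 1).foldl
      (fun acc k => g acc (PySem.List.pyGetD ts k d1) (PySem.List.pyGetD hs k d2)) init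
    = (ts.zip hs).foldl (fun acc p => g acc p.1 p.2) init := by
  rw [PySem.List.pyRange_one, List.foldl_map]
  have h1 : ((hs.length : Int) - 0).toNat = hs.length := by simp
  rw [h1]
  rw [← pvFoldl_range_zip d1 d2 g hs ts init hlen]
  refine PySem.List.foldl_congr_mem _ _ _ _ (fun acc k hk => ?_)
  rw [zero_add, PySem.List.pyGetD_natCast, PySem.List.pyGetD_natCast]

lemma pvDedup_eq (hap : Nat → List String) (N M : Nat)
    (hinj : ∀ i j, i < N → j < N → hap i = hap j → i = j)
    (hM : M = max 1 (N / 2)) (hN : N = 1 ∨ N = 2 * (N / 2)) (hNpos : 0 < N) :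
    (List.range N).foldl (fun indiv j =>
      if [hap j, hap (N - 1 - j)] ∉ indiv ∧ [hap (N - 1 - j), hap j] ∉ indiv
      then indiv ++ [[hap j, hap (N - 1 - j)]] else indiv) []
    = (List.range M).map (fun i => [hap i, hap (N - 1 - i)]) := by
  have hcase : (N = 1 ∧ M = 1) ∨ (M = N / 2 ∧ N = 2 * (N / 2) ∧ 1 ≤ N / 2) := by
    rcases hN with h | h
    · left; constructor; · exact h
      rw [hM, h]; decide
    · right
      refine ⟨?_, h, by omega⟩
      rw [hM]; omega
  have key : ∀ m, m ≤ N →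
      (List.range m).foldl (fun indiv j =>
        if [hap j, hap (N - 1 - j)] ∉ indiv ∧ [hap (N - 1 - j), hap j] ∉ indiv
        then indiv ++ [[hap j, hap (N - 1 - j)]] else indiv) []
      = (List.range (min m M)).map (fun i => [hap i, hap (N - 1 - i)]) := by
    intro m
    induction m with
    | zero => intro _; simp
    | succ m ihm =>
      intro hm
      rw [List.range_succ, List.foldl_append, ihm (by omega), List.foldl_cons, List.foldl_nil]
      have hmem : ∀ x, x ∈ (List.range (min m M)).map (fun i => [hap i, hap (N - 1 - i)]) ↔
          ∃ i, i < min m M ∧ [hap i, hap (N - 1 - i)] = x := by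
        intro x; simp [List.mem_map, List.mem_range]
      by_cases hc : N - 1 - m < min m M
      · -- rev pair already present: skip
        have hrev : [hap (N - 1 - m), hap m] ∈
            (List.range (min m M)).map (fun i => [hap i, hap (N - 1 - i)]) := by
          rw [hmem]
          exact ⟨N - 1 - m, hc, by rw [show N - 1 - (N - 1 - m) = m by omega]⟩
        rw [if_neg (by tauto)]
        have hMm : M ≤ m := by
          by_contra h'
          rw [Nat.not_le] at h'
          rw [Nat.min_eq_left (le_of_lt h')] at hc
          rcases hcase with ⟨e1, e2⟩ | ⟨e1, e2, e3⟩ <;> omega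
        rw [Nat.min_eq_right hMm, Nat.min_eq_right (by omega)]
      · -- fresh pair: append
        have hmlt : m < M := by
          by_contra h'
          rw [Nat.not_lt] at h'
          rw [Nat.min_eq_right h'] at hc
          rcases hcase with ⟨e1, e2⟩ | ⟨e1, e2, e3⟩ <;> omega
        have hpair : [hap m, hap (N - 1 - m)] ∉
            (List.range (min m M)).map (fun i => [hap i, hap (N - 1 - i)]) := by
          rw [hmem]
          rintro ⟨i, hilt, heq⟩
          simp only [List.cons.injEq, and_true] at heq
          have : i = m := hinj i m (by omega) (by omega) heq.1
          omega
        have hrev : [hap (N - 1 - m), hap m] ∉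
            (List.range (min m M)).map (fun i => [hap i, hap (N - 1 - i)]) := by
          rw [hmem]
          rintro ⟨i, hilt, heq⟩
          simp only [List.cons.injEq, and_true] at heq
          have : i = N - 1 - m := hinj i (N - 1 - m) (by omega) (by omega) heq.1
          omega
        rw [if_pos ⟨hpair, hrev⟩]
        rw [show min m M = m by omega, show min (m + 1) M = m + 1 by omega, List.range_succ,
          List.map_append]
        simp
  have := key N (le_refl N)
  rw [this, show min N M = M by rcases hcase with ⟨e1, e2⟩ | ⟨e1, e2, e3⟩ <;> omega]

def pvCHf : List String → Nat → List String
  | [], _ => []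
  | t :: ts, i =>
    if t = "heterozygous" then (if i % 2 = 1 then "0" else "1") :: pvCHf ts (i / 2)
    else t :: pvCHf ts i

lemma pvCHf_eq (ts : List String) (m : Nat) (ht : pvTokP ts) (hm : m < 2 ^ pvHets ts) :
    pvCHf ts m = pvCH ts (2 ^ pvHets ts - 1 - m) := by
  induction ts generalizing m with
  | nil => simp [pvCHf, pvCH]
  | cons t ts ih =>
    have hts : pvTokP ts := fun x hx => ht x (List.mem_cons_of_mem _ hx)
    have hP : 0 < 2 ^ pvHets ts := by positivity
    by_cases h0 : t = "heterozygous"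
    · subst h0
      rw [pvHets_cons_het, pow_succ'] at hm ⊢
      simp only [pvCHf, pvCH, reduceIte]
      have harg : (2 * 2 ^ pvHets ts - 1 - m) / 2 = 2 ^ pvHets ts - 1 - m / 2 := by omega
      have hpar : (2 * 2 ^ pvHets ts - 1 - m) % 2 = 1 - m % 2 := by omega
      rw [harg, hpar, ih (m / 2) hts (by omega)]
      rcases Nat.mod_two_eq_zero_or_one m with h1 | h1 <;> simp [h1]
    · rw [pvHets_cons_ne _ ts h0] at hm ⊢
      simp only [pvCHf, pvCH, if_neg h0, ih m hts hm]

def pvBStep (i : Int) : (List String × List String × Nat) → Int → (List String × List String × Nat) :=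
  fun st s =>
    if s = 0 then (st.1 ++ ["0"], st.2.1 ++ ["0"], st.2.2)
    else if s = 2 then (st.1 ++ ["1"], st.2.1 ++ ["1"], st.2.2)
    else if s = 1 then
      let bit := PySem.Int.band (i >>> st.2.2) 1
      (st.1 ++ [PySem.Int.toStr bit], st.2.1 ++ [PySem.Int.toStr (1 - bit)], st.2.2 + 1)
    else st

lemma pvBit_eq (m b : Nat) : PySem.Int.band ((m : Int) >>> b) 1 = ((m >>> b) % 2 : Nat) := by
  have h1 : ((m : Int) >>> b) = ((m >>> b : Nat) : Int) := by
    simp [Int.natCast_shiftRight]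
  rw [h1, show (1 : Int) = ((1 : Nat) : Int) from rfl, PySem.Int.band_natCast,
    Nat.and_one_is_mod]

lemma pvBuildAux (col : List Int) (m : Nat) :
    ∀ (h0 c0 : List String) (b0 : Nat),
    col.foldl (pvBStep (m : Int)) (h0, c0, b0)
    = (h0 ++ pvCH (pvTokL col) (m >>> b0), c0 ++ pvCHf (pvTokL col) (m >>> b0),
       b0 + pvHets (pvTokL col)) := by
  induction col with
  | nil => intro h0 c0 b0; simp [pvTokL, pvCH, pvCHf, pvHets]
  | cons s col ih =>
    intro h0 c0 b0
    rcases eq_or_ne s 0 with h | hs0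
    · subst h
      have htl : pvTokL (0 :: col) = "0" :: pvTokL col := by simp [pvTokL]
      simp only [List.foldl_cons, pvBStep, Int.reduceEq, reduceIte, htl, ih]
      rw [pvHets_cons_ne _ _ (by decide)]
      simp [pvCH, pvCHf]
    · rcases eq_or_ne s 2 with h | hs2
      · subst h
        have htl : pvTokL (2 :: col) = "1" :: pvTokL col := by simp [pvTokL]
        simp only [List.foldl_cons, pvBStep, Int.reduceEq, reduceIte, htl, ih]
        rw [pvHets_cons_ne _ _ (by decide)]
        simp [pvCH, pvCHf]
      · rcases eq_or_ne s 1 with h | hs1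
        · subst h
          have htl : pvTokL (1 :: col) = "heterozygous" :: pvTokL col := by simp [pvTokL]
          simp only [List.foldl_cons, pvBStep, Int.reduceEq, reduceIte, htl, ih, pvBit_eq]
          rw [pvHets_cons_het]
          have hsh : m >>> (b0 + 1) = (m >>> b0) / 2 := Nat.shiftRight_succ m b0 ▸ rfl
          simp only [pvCH, pvCHf, reduceIte]
          rcases Nat.mod_two_eq_zero_or_one (m >>> b0) with h1 | h1 <;>
            simp [h1, hsh] <;>
            refine ⟨by decide, by decide, by omega⟩
        · simp only [List.foldl_cons, pvBStep, if_neg hs0, if_neg hs2, if_neg hs1, ih]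
          simp [pvTokL, hs0, hs1, hs2]


lemma pvColB (col : List Int) (m : Nat) (hm : m < 2 ^ pvHets (pvTokL col)) :
    pvBuildPair col (m : Int)
    = (pvCH (pvTokL col) m, pvCH (pvTokL col) (2 ^ pvHets (pvTokL col) - 1 - m)) := by
  have h := pvBuildAux col m [] [] 0
  unfold pvBuildPair
  rw [show (fun (st : List String × List String × Nat) (s : Int) =>
    if s = 0 then (st.1 ++ ["0"], st.2.1 ++ ["0"], st.2.2)
    else if s = 2 then (st.1 ++ ["1"], st.2.1 ++ ["1"], st.2.2)
    else if s = 1 then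
      let bit := PySem.Int.band ((m : Int) >>> st.2.2) 1
      (st.1 ++ [PySem.Int.toStr bit], st.2.1 ++ [PySem.Int.toStr (1 - bit)], st.2.2 + 1)
    else st) = pvBStep (m : Int) from rfl, h]
  simp [pvCHf_eq (pvTokL col) m (pvTokP_tokL col) hm]

lemma pvN_cases (h : Nat) : 2 ^ h = 1 ∨ 2 ^ h = 2 * (2 ^ h / 2) := by
  cases h with
  | zero => left; rfl
  | succ k =>
    right
    rw [pow_succ', Nat.mul_div_cancel_left _ (by norm_num)]

lemma pvColA (ts : List String) (ht : pvTokP ts) :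
    (PySem.List.pyRange 0 ((pvPossible ts).length : Int) 1).foldl (fun indiv j =>
      let hapj := PySem.List.pyGetD (pvPossible ts) j []
      let haplotype := (PySem.List.pyRange 0 (hapj.length : Int) 1).foldl (fun hap k =>
        if PySem.List.pyGetD ts k "" = PySem.List.pyGetD hapj k "" then
          (if PySem.List.pyGetD hapj k "" = "1" then hap ++ ["1"] else hap ++ ["0"])
        else
          (if PySem.List.pyGetD hapj k "" = "1" then hap ++ ["0"] else hap ++ ["1"])) []
      let pair := [hapj, haplotype]
      let rev_pair := [haplotype, hapj]
      if pair ∉ indiv ∧ rev_pair ∉ indiv then indiv ++ [pair] else indiv) []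
    = (List.range (max 1 (2 ^ pvHets ts / 2))).map
        (fun i => [pvCH ts i, pvCH ts (2 ^ pvHets ts - 1 - i)]) := by
  rw [PySem.List.foldl_pyRange_zero_pyGetD' (pvPossible ts) []
    (fun indiv hapj =>
      let haplotype := (PySem.List.pyRange 0 (hapj.length : Int) 1).foldl (fun hap k =>
        if PySem.List.pyGetD ts k "" = PySem.List.pyGetD hapj k "" then
          (if PySem.List.pyGetD hapj k "" = "1" then hap ++ ["1"] else hap ++ ["0"])
        else
          (if PySem.List.pyGetD hapj k "" = "1" then hap ++ ["0"] else hap ++ ["1"])) []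
      if [hapj, haplotype] ∉ indiv ∧ [haplotype, hapj] ∉ indiv
      then indiv ++ [[hapj, haplotype]] else indiv) []]
  rw [pvPossible_eq ts ht, List.foldl_map]
  rw [PySem.List.foldl_congr_mem (List.range (2 ^ pvHets ts)) _
    (fun indiv j =>
      if [pvCH ts j, pvCH ts (2 ^ pvHets ts - 1 - j)] ∉ indiv ∧
         [pvCH ts (2 ^ pvHets ts - 1 - j), pvCH ts j] ∉ indiv
      then indiv ++ [[pvCH ts j, pvCH ts (2 ^ pvHets ts - 1 - j)]] else indiv) []
    (fun indiv j hj => ?_)]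
  · exact pvDedup_eq (pvCH ts) (2 ^ pvHets ts) (max 1 (2 ^ pvHets ts / 2))
      (fun i j hi hj => pvCH_inj ts i j hi hj) rfl (pvN_cases _) (by positivity)
  · have hj' : j < 2 ^ pvHets ts := List.mem_range.mp hj
    have hinner : (PySem.List.pyRange 0 ((pvCH ts j).length : Int) 1).foldl (fun hap k =>
        if PySem.List.pyGetD ts k "" = PySem.List.pyGetD (pvCH ts j) k "" then
          (if PySem.List.pyGetD (pvCH ts j) k "" = "1" then hap ++ ["1"] else hap ++ ["0"])
        else
          (if PySem.List.pyGetD (pvCH ts j) k "" = "1" then hap ++ ["0"] else hap ++ ["1"])) []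
        = pvCH ts (2 ^ pvHets ts - 1 - j) := by
      rw [pvFoldl_pyRange_zip ts (pvCH ts j) "" ""
        (fun hap u c =>
          if u = c then (if c = "1" then hap ++ ["1"] else hap ++ ["0"])
          else (if c = "1" then hap ++ ["0"] else hap ++ ["1"])) []
        (pvCH_length ts j).symm]
      rw [show (fun (hap : List String) (p : String × String) =>
          if p.1 = p.2 then (if p.2 = "1" then hap ++ ["1"] else hap ++ ["0"])
          else (if p.2 = "1" then hap ++ ["0"] else hap ++ ["1"]))
        = (fun hap p => hap ++ [pvComp p.1 p.2]) from by
          funext hap p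
          simp only [pvComp]
          split_ifs <;> rfl]
      rw [PySem.List.foldl_append_singleton_eq_map (fun p => pvComp p.1 p.2)
        (ts.zip (pvCH ts j)) [], List.nil_append, pvComp_eq ts j ht hj']
    simp only [hinner]

lemma pvZipMapSelf {α β : Type} (l : List α) (f : α → β) :
    l.zip (l.map f) = l.map (fun x => (x, f x)) := by
  induction l with
  | nil => rfl
  | cons a l ih => simp [ih]

lemma pvNmax (h : Nat) : (if h > 0 then 1 <<< (h - 1) else 1) = max 1 (2 ^ h / 2) := by
  cases h with
  | zero => decide
  | succ k =>
    rw [if_pos (Nat.succ_pos k), Nat.one_shiftLeft, Nat.succ_sub_one, pow_succ',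
      Nat.mul_div_cancel_left _ (by norm_num)]
    exact (Nat.max_eq_right (Nat.one_le_two_pow)).symm




lemma pvColEq (col : List Int) :
    (PySem.List.pyRange 0 ((pvPossible (pvTok col)).length : Int) 1).foldl (fun indiv j =>
      let hapj := PySem.List.pyGetD (pvPossible (pvTok col)) j []
      let haplotype := (PySem.List.pyRange 0 (hapj.length : Int) 1).foldl (fun hap k =>
        if PySem.List.pyGetD (pvTok col) k "" = PySem.List.pyGetD hapj k "" then
          (if PySem.List.pyGetD hapj k "" = "1" then hap ++ ["1"] else hap ++ ["0"])
        else
          (if PySem.List.pyGetD hapj k "" = "1" then hap ++ ["0"] else hap ++ ["1"])) []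
      let pair := [hapj, haplotype]
      let rev_pair := [haplotype, hapj]
      if pair ∉ indiv ∧ rev_pair ∉ indiv then indiv ++ [pair] else indiv) []
    = (PySem.List.pyRange 0 ((if col.countP (fun s => s = 1) > 0
          then 1 <<< (col.countP (fun s => s = 1) - 1) else 1 : Nat) : Int) 1).map (fun i =>
        [(pvBuildPair col i).1, (pvBuildPair col i).2]) := by
  have hht : pvHets (pvTokL col) = col.countP (fun s => s = 1) := pvHets_tokL col
  rw [pvTok_eq, pvColA (pvTokL col) (pvTokP_tokL col)]
  rw [PySem.List.pyRange_zero_nat, List.map_map]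
  rw [pvNmax, ← hht]
  refine (List.map_congr_left (fun m hm => ?_)).symm
  have hm' : m < 2 ^ pvHets (pvTokL col) := by
    have := List.mem_range.mp hm
    have hle : max 1 (2 ^ pvHets (pvTokL col) / 2) ≤ 2 ^ pvHets (pvTokL col) := by
      have : 0 < 2 ^ pvHets (pvTokL col) := by positivity
      omega
    omega
  simp only [Function.comp_apply, pvColB col m hm']

lemma pvPairs_eq (u : List (List String)) :
    pvPairs u (u.map pvPossible) = u.map (fun ts =>
      (PySem.List.pyRange 0 ((pvPossible ts).length : Int) 1).foldl (fun indiv j =>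
        let hapj := PySem.List.pyGetD (pvPossible ts) j []
        let haplotype := (PySem.List.pyRange 0 (hapj.length : Int) 1).foldl (fun hap k =>
          if PySem.List.pyGetD ts k "" = PySem.List.pyGetD hapj k "" then
            (if PySem.List.pyGetD hapj k "" = "1" then hap ++ ["1"] else hap ++ ["0"])
          else
            (if PySem.List.pyGetD hapj k "" = "1" then hap ++ ["0"] else hap ++ ["1"])) []
        let pair := [hapj, haplotype]
        let rev_pair := [haplotype, hapj]
        if pair ∉ indiv ∧ rev_pair ∉ indiv then indiv ++ [pair] else indiv) []) := by
  unfold pvPairs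
  rw [pvFoldl_pyRange_zip u (u.map pvPossible) [] []
    (fun hp tsi Pi =>
      let indiv := (PySem.List.pyRange 0 (Pi.length : Int) 1).foldl (fun indiv j =>
        let hapj := PySem.List.pyGetD Pi j []
        let haplotype := (PySem.List.pyRange 0 (hapj.length : Int) 1).foldl (fun hap k =>
          if PySem.List.pyGetD tsi k "" = PySem.List.pyGetD hapj k "" then
            (if PySem.List.pyGetD hapj k "" = "1" then hap ++ ["1"] else hap ++ ["0"])
          else
            (if PySem.List.pyGetD hapj k "" = "1" then hap ++ ["0"] else hap ++ ["1"])) []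
        let pair := [hapj, haplotype]
        let rev_pair := [haplotype, hapj]
        if pair ∉ indiv ∧ rev_pair ∉ indiv then indiv ++ [pair] else indiv) []
      hp ++ [indiv]) [] (by simp)]
  rw [pvZipMapSelf, List.foldl_map]
  rw [PySem.List.foldl_append_singleton_eq_map _ u [], List.nil_append]

theorem pvMain (data : List (List Int)) : lst_haplotypes data = lst_haplotypes_alt data := by
  simp only [lst_haplotypes, lst_haplotypes_alt]
  rw [PySem.List.foldl_append_singleton_eq_map pvTok (pvConvert data) [], List.nil_append]
  rw [pvPairs_eq, List.map_map]
  unfold pvConvert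
  rw [List.map_map]
  refine List.map_congr_left (fun j _ => ?_)
  simp only [Function.comp_apply]
  exact pvColEq _

-- ===== VERDICT (by name: the statement is the Claim_ definition above) =====
theorem lst_haplotypes_spec : Claim_equal_lst_haplotypes := by
  intro data _ _
  unfold Spec_lst_haplotypes
  exact pvMain data
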